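-- pv_equiv track=rewrite | github.com/AhmedAslam28/AFDE-Autonomous-Financial-Decision-Engine | features/ticker_search.py | search_tickers
-- ===== SOURCE A (Python) =====
-- POPULAR = [
--     {"ticker":"AAPL","name":"Apple Inc.","sector":"Technology","logo":"https://logo.clearbit.com/apple.com"},
--     {"ticker":"MSFT","name":"Microsoft Corporation","sector":"Technology","logo":"https://logo.clearbit.com/microsoft.com"},
--     {"ticker":"GOOGL","name":"Alphabet Inc.","sector":"Technology","logo":"https://logo.clearbit.com/google.com"},
--     {"ticker":"AMZN","name":"Amazon.com Inc.","sector":"Consumer Discretionary","logo":"https://logo.clearbit.com/amazon.com"},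
--     {"ticker":"NVDA","name":"NVIDIA Corporation","sector":"Technology","logo":"https://logo.clearbit.com/nvidia.com"},
--     {"ticker":"META","name":"Meta Platforms Inc.","sector":"Technology","logo":"https://logo.clearbit.com/meta.com"},
--     {"ticker":"TSLA","name":"Tesla Inc.","sector":"Consumer Discretionary","logo":"https://logo.clearbit.com/tesla.com"},
--     {"ticker":"JPM","name":"JPMorgan Chase & Co.","sector":"Financials","logo":"https://logo.clearbit.com/jpmorganchase.com"},
--     {"ticker":"JNJ","name":"Johnson & Johnson","sector":"Healthcare","logo":"https://logo.clearbit.com/jnj.com"},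
--     {"ticker":"V","name":"Visa Inc.","sector":"Financials","logo":"https://logo.clearbit.com/visa.com"},
--     {"ticker":"BRK-B","name":"Berkshire Hathaway","sector":"Financials","logo":"https://logo.clearbit.com/berkshirehathaway.com"},
--     {"ticker":"XOM","name":"Exxon Mobil Corp.","sector":"Energy","logo":"https://logo.clearbit.com/exxonmobil.com"},
--     {"ticker":"AMD","name":"Advanced Micro Devices","sector":"Technology","logo":"https://logo.clearbit.com/amd.com"},
--     {"ticker":"NFLX","name":"Netflix Inc.","sector":"Communication Services","logo":"https://logo.clearbit.com/netflix.com"},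
--     {"ticker":"INTC","name":"Intel Corporation","sector":"Technology","logo":"https://logo.clearbit.com/intel.com"},
--     {"ticker":"CRM","name":"Salesforce Inc.","sector":"Technology","logo":"https://logo.clearbit.com/salesforce.com"},
--     {"ticker":"PLTR","name":"Palantir Technologies","sector":"Technology","logo":"https://logo.clearbit.com/palantir.com"},
--     {"ticker":"UBER","name":"Uber Technologies","sector":"Technology","logo":"https://logo.clearbit.com/uber.com"},
--     {"ticker":"COIN","name":"Coinbase Global","sector":"Financials","logo":"https://logo.clearbit.com/coinbase.com"},
--     {"ticker":"SHOP","name":"Shopify Inc.","sector":"Technology","logo":"https://logo.clearbit.com/shopify.com"},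
--     {"ticker":"SQ","name":"Block Inc.","sector":"Financials","logo":"https://logo.clearbit.com/block.xyz"},
--     {"ticker":"SPOT","name":"Spotify Technology","sector":"Communication Services","logo":"https://logo.clearbit.com/spotify.com"},
--     {"ticker":"PFE","name":"Pfizer Inc.","sector":"Healthcare","logo":"https://logo.clearbit.com/pfizer.com"},
--     {"ticker":"BAC","name":"Bank of America Corp.","sector":"Financials","logo":"https://logo.clearbit.com/bankofamerica.com"},
--     {"ticker":"DIS","name":"Walt Disney Co.","sector":"Communication Services","logo":"https://logo.clearbit.com/disney.com"},
-- ]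
--
-- def search_tickers(query: str, limit: int = 6) -> list[dict]:
--     if not query:
--         return POPULAR[:limit]
--     q = query.upper().strip()
--     results, seen = [], set()
--     def _add(t):
--         if t["ticker"] not in seen:
--             seen.add(t["ticker"]); results.append(t)
--     for t in POPULAR:
--         if t["ticker"] == q: _add(t)
--     for t in POPULAR:
--         if t["ticker"].startswith(q): _add(t)
--     ql = query.lower()
--     for t in POPULAR:
--         if ql in t["name"].lower(): _add(t)
--     return results[:limit]
-- ===== SOURCE B (Python) =====
-- POPULAR = [
--     {"ticker":"AAPL","name":"Apple Inc.","sector":"Technology","logo":"https://logo.clearbit.com/apple.com"},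
--     {"ticker":"MSFT","name":"Microsoft Corporation","sector":"Technology","logo":"https://logo.clearbit.com/microsoft.com"},
--     {"ticker":"GOOGL","name":"Alphabet Inc.","sector":"Technology","logo":"https://logo.clearbit.com/google.com"},
--     {"ticker":"AMZN","name":"Amazon.com Inc.","sector":"Consumer Discretionary","logo":"https://logo.clearbit.com/amazon.com"},
--     {"ticker":"NVDA","name":"NVIDIA Corporation","sector":"Technology","logo":"https://logo.clearbit.com/nvidia.com"},
--     {"ticker":"META","name":"Meta Platforms Inc.","sector":"Technology","logo":"https://logo.clearbit.com/meta.com"},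
--     {"ticker":"TSLA","name":"Tesla Inc.","sector":"Consumer Discretionary","logo":"https://logo.clearbit.com/tesla.com"},
--     {"ticker":"JPM","name":"JPMorgan Chase & Co.","sector":"Financials","logo":"https://logo.clearbit.com/jpmorganchase.com"},
--     {"ticker":"JNJ","name":"Johnson & Johnson","sector":"Healthcare","logo":"https://logo.clearbit.com/jnj.com"},
--     {"ticker":"V","name":"Visa Inc.","sector":"Financials","logo":"https://logo.clearbit.com/visa.com"},
--     {"ticker":"BRK-B","name":"Berkshire Hathaway","sector":"Financials","logo":"https://logo.clearbit.com/berkshirehathaway.com"},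
--     {"ticker":"XOM","name":"Exxon Mobil Corp.","sector":"Energy","logo":"https://logo.clearbit.com/exxonmobil.com"},
--     {"ticker":"AMD","name":"Advanced Micro Devices","sector":"Technology","logo":"https://logo.clearbit.com/amd.com"},
--     {"ticker":"NFLX","name":"Netflix Inc.","sector":"Communication Services","logo":"https://logo.clearbit.com/netflix.com"},
--     {"ticker":"INTC","name":"Intel Corporation","sector":"Technology","logo":"https://logo.clearbit.com/intel.com"},
--     {"ticker":"CRM","name":"Salesforce Inc.","sector":"Technology","logo":"https://logo.clearbit.com/salesforce.com"},
--     {"ticker":"PLTR","name":"Palantir Technologies","sector":"Technology","logo":"https://logo.clearbit.com/palantir.com"},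
--     {"ticker":"UBER","name":"Uber Technologies","sector":"Technology","logo":"https://logo.clearbit.com/uber.com"},
--     {"ticker":"COIN","name":"Coinbase Global","sector":"Financials","logo":"https://logo.clearbit.com/coinbase.com"},
--     {"ticker":"SHOP","name":"Shopify Inc.","sector":"Technology","logo":"https://logo.clearbit.com/shopify.com"},
--     {"ticker":"SQ","name":"Block Inc.","sector":"Financials","logo":"https://logo.clearbit.com/block.xyz"},
--     {"ticker":"SPOT","name":"Spotify Technology","sector":"Communication Services","logo":"https://logo.clearbit.com/spotify.com"},
--     {"ticker":"PFE","name":"Pfizer Inc.","sector":"Healthcare","logo":"https://logo.clearbit.com/pfizer.com"},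
--     {"ticker":"BAC","name":"Bank of America Corp.","sector":"Financials","logo":"https://logo.clearbit.com/bankofamerica.com"},
--     {"ticker":"DIS","name":"Walt Disney Co.","sector":"Communication Services","logo":"https://logo.clearbit.com/disney.com"},
-- ]
--
-- def search_tickers(query: str, limit: int = 6) -> list[dict]:
--     # One pass over POPULAR into three priority buckets (exact / prefix / name
--     # substring); tickers are distinct and an exact match is also a prefix
--     # match, so first-matching-bucket classification reproduces A's dedup.
--     # No empty-query special case: every ticker starts with "", so an empty
--     # query fills the prefix bucket with all of POPULAR in order.
--     q = query.upper().strip()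
--     ql = query.lower()
--     exact, prefix, by_name = [], [], []
--     for t in POPULAR:
--         if t["ticker"] == q:
--             exact.append(t)
--         elif t["ticker"].startswith(q):
--             prefix.append(t)
--         elif ql in t["name"].lower():
--             by_name.append(t)
--     return (exact + prefix + by_name)[:limit]
-- ===== Notes on version B (the rewrite author's own statement) =====
-- stated objective: simpler
-- what changed: B replaces A's three sequential scans over POPULAR plus a dedup set of already-added tickers by a single classifying pass that drops each ticker into the first matching of three priority buckets (exact / prefix / name-substring) and concatenates them; it also drops the empty-query special case, which the prefix bucket subsumes (every ticker starts with the empty string). Distinct tickers and exact-implies-prefix make the dedup set unnecessary.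
import Mathlib
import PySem

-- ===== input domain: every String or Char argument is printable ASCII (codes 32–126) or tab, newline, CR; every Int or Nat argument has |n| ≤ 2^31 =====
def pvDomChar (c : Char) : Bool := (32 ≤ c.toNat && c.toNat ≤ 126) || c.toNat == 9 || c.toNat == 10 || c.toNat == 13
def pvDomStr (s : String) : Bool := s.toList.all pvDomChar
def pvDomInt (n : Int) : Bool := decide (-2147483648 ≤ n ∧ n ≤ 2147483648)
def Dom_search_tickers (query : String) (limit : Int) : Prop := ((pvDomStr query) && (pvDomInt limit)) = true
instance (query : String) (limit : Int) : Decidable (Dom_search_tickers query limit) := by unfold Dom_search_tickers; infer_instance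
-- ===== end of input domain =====

-- B replaces A's three scans over POPULAR with a 'seen' dedup set by ONE classifying pass into
-- three priority buckets, with no empty-query special case (simpler decomposition); return values are proved equal.

-- ===== PORT A =====
def pvEntry (tk nm sec lg : String) : List (String × String) :=
  [("ticker", tk), ("name", nm), ("sector", sec), ("logo", lg)]

def pvPOPULAR : List (List (String × String)) := [
  pvEntry "AAPL" "Apple Inc." "Technology" "https://logo.clearbit.com/apple.com",
  pvEntry "MSFT" "Microsoft Corporation" "Technology" "https://logo.clearbit.com/microsoft.com",
  pvEntry "GOOGL" "Alphabet Inc." "Technology" "https://logo.clearbit.com/google.com",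
  pvEntry "AMZN" "Amazon.com Inc." "Consumer Discretionary" "https://logo.clearbit.com/amazon.com",
  pvEntry "NVDA" "NVIDIA Corporation" "Technology" "https://logo.clearbit.com/nvidia.com",
  pvEntry "META" "Meta Platforms Inc." "Technology" "https://logo.clearbit.com/meta.com",
  pvEntry "TSLA" "Tesla Inc." "Consumer Discretionary" "https://logo.clearbit.com/tesla.com",
  pvEntry "JPM" "JPMorgan Chase & Co." "Financials" "https://logo.clearbit.com/jpmorganchase.com",
  pvEntry "JNJ" "Johnson & Johnson" "Healthcare" "https://logo.clearbit.com/jnj.com",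
  pvEntry "V" "Visa Inc." "Financials" "https://logo.clearbit.com/visa.com",
  pvEntry "BRK-B" "Berkshire Hathaway" "Financials" "https://logo.clearbit.com/berkshirehathaway.com",
  pvEntry "XOM" "Exxon Mobil Corp." "Energy" "https://logo.clearbit.com/exxonmobil.com",
  pvEntry "AMD" "Advanced Micro Devices" "Technology" "https://logo.clearbit.com/amd.com",
  pvEntry "NFLX" "Netflix Inc." "Communication Services" "https://logo.clearbit.com/netflix.com",
  pvEntry "INTC" "Intel Corporation" "Technology" "https://logo.clearbit.com/intel.com",
  pvEntry "CRM" "Salesforce Inc." "Technology" "https://logo.clearbit.com/salesforce.com",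
  pvEntry "PLTR" "Palantir Technologies" "Technology" "https://logo.clearbit.com/palantir.com",
  pvEntry "UBER" "Uber Technologies" "Technology" "https://logo.clearbit.com/uber.com",
  pvEntry "COIN" "Coinbase Global" "Financials" "https://logo.clearbit.com/coinbase.com",
  pvEntry "SHOP" "Shopify Inc." "Technology" "https://logo.clearbit.com/shopify.com",
  pvEntry "SQ" "Block Inc." "Financials" "https://logo.clearbit.com/block.xyz",
  pvEntry "SPOT" "Spotify Technology" "Communication Services" "https://logo.clearbit.com/spotify.com",
  pvEntry "PFE" "Pfizer Inc." "Healthcare" "https://logo.clearbit.com/pfizer.com",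
  pvEntry "BAC" "Bank of America Corp." "Financials" "https://logo.clearbit.com/bankofamerica.com",
  pvEntry "DIS" "Walt Disney Co." "Communication Services" "https://logo.clearbit.com/disney.com"]

-- t["ticker"] / t["name"]: every pvPOPULAR entry carries both keys, so getD never takes the default here
def pvTicker (t : List (String × String)) : String := ((PySem.Dict.mk t).get? "ticker").getD ""
def pvName (t : List (String × String)) : String := ((PySem.Dict.mk t).get? "name").getD ""

-- the inner helper _add(t): append t to results and its ticker to seen unless already seen
def pvAdd (st : List (List (String × String)) × PySem.Set String) (t : List (String × String)) :
    List (List (String × String)) × PySem.Set String :=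
  if PySem.Set.contains st.2 (pvTicker t) then st
  else (st.1 ++ [t], PySem.Set.add st.2 (pvTicker t))

def search_tickers (query : String) (limit : Int) : List (List (String × String)) :=
  if query == "" then PySem.List.slice pvPOPULAR none (some limit)
  else
    let q := PySem.Str.strip (PySem.Str.upper query)
    let st1 := pvPOPULAR.foldl (fun st t => if pvTicker t == q then pvAdd st t else st)
      ([], PySem.Set.empty)
    let st2 := pvPOPULAR.foldl
      (fun st t => if PySem.Str.startswith (pvTicker t) q then pvAdd st t else st) st1
    let ql := PySem.Str.lower query
    let st3 := pvPOPULAR.foldl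
      (fun st t => if PySem.Str.isIn ql (PySem.Str.lower (pvName t)) then pvAdd st t else st) st2
    PySem.List.slice st3.1 none (some limit)

-- ===== PORT B =====
-- B has no empty-query special case: with query = "" every ticker lands in the prefix bucket
def search_tickers_alt (query : String) (limit : Int) : List (List (String × String)) :=
    let q := PySem.Str.strip (PySem.Str.upper query)
    let ql := PySem.Str.lower query
    let bs := pvPOPULAR.foldl
      (fun (bs : List (List (String × String)) × List (List (String × String)) ×
            List (List (String × String))) t =>
        if pvTicker t == q then (bs.1 ++ [t], bs.2.1, bs.2.2)
        else if PySem.Str.startswith (pvTicker t) q then (bs.1, bs.2.1 ++ [t], bs.2.2)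
        else if PySem.Str.isIn ql (PySem.Str.lower (pvName t)) then (bs.1, bs.2.1, bs.2.2 ++ [t])
        else bs)
      ([], [], [])
    PySem.List.slice (bs.1 ++ bs.2.1 ++ bs.2.2) none (some limit)

-- ===== PRECONDITION & SPEC =====
def Spec_search_tickers (query : String) (limit : Int) (out : List (List (String × String))) : Prop := out = search_tickers_alt query limit
instance (query : String) (limit : Int) (out : List (List (String × String))) : Decidable (Spec_search_tickers query limit out) := by unfold Spec_search_tickers; infer_instance

-- ===== CLAIM (what is proved, stated in full; the proofs are below) =====
def Claim_equal_search_tickers : Prop := ∀ (query : String) (limit : Int), Dom_search_tickers query limit → Spec_search_tickers query limit (search_tickers query limit)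

-- ===== LEMMAS AND PROOFS =====
lemma pvContains_eq_decide (s : PySem.Set String) (x : String) :
    PySem.Set.contains s x = decide (x ∈ s) := by
  rw [Bool.eq_iff_iff]
  simp

lemma pvNodup : (pvPOPULAR.map pvTicker).Nodup := by decide

lemma pvMemMapFilter (p : List (String × String) → Bool)
    (ts : List (List (String × String))) (hnd : (ts.map pvTicker).Nodup)
    (t : List (String × String)) (ht : t ∈ ts) :
    pvTicker t ∈ (ts.filter p).map pvTicker ↔ p t = true := by
  constructor
  · intro hm
    obtain ⟨t', ht', he⟩ := List.mem_map.mp hm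
    obtain ⟨ht'ts, hp⟩ := List.mem_filter.mp ht'
    exact List.inj_on_of_nodup_map hnd ht'ts ht he ▸ hp
  · intro hp
    exact List.mem_map_of_mem (List.mem_filter.mpr ⟨ht, hp⟩)

lemma pvExactPrefix (q : String) (t : List (String × String))
    (h : (pvTicker t == q) = true) : PySem.Str.startswith (pvTicker t) q = true := by
  rw [beq_iff_eq.mp h]
  rw [PySem.Str.startswith_eq]
  exact (PySem.Chars.startswith_iff _ _).mpr (List.prefix_refl _)

lemma pvLoopA (p m : List (String × String) → Bool) :
    ∀ (ts : List (List (String × String))) (acc : List (List (String × String)))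
      (seen : PySem.Set String),
      (∀ t ∈ ts, PySem.Set.contains seen (pvTicker t) = m t) →
      (ts.map pvTicker).Nodup →
      ts.foldl (fun st t => if p t then pvAdd st t else st) (acc, seen)
        = (acc ++ ts.filter (fun t => p t && !m t),
           PySem.Set.update seen ((ts.filter (fun t => p t && !m t)).map pvTicker)) := by
  intro ts
  induction ts with
  | nil => intro acc seen _ _; simp [PySem.Set.update]
  | cons t ts ih =>
    intro acc seen hseen hnd
    have hmt := hseen t (List.mem_cons_self ..)
    simp only [List.map_cons, List.nodup_cons] at hnd
    simp only [List.foldl_cons, List.filter_cons]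
    cases hp : p t
    · simpa using ih acc seen (fun t' ht' => hseen t' (List.mem_cons_of_mem _ ht')) hnd.2
    · cases hm : m t
      · have hc : PySem.Set.contains seen (pvTicker t) = false := hmt.trans hm
        have hseen' : ∀ t' ∈ ts,
            PySem.Set.contains (PySem.Set.add seen (pvTicker t)) (pvTicker t') = m t' := by
          intro t' ht'
          have hne : pvTicker t' ≠ pvTicker t := by
            intro he; exact hnd.1 (he ▸ List.mem_map_of_mem ht')
          rw [← hseen t' (List.mem_cons_of_mem _ ht')]
          rw [pvContains_eq_decide, pvContains_eq_decide]
          simp [PySem.Set.mem_add, hne]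
        have hnotin : pvTicker t ∉ seen := by simpa [pvContains_eq_decide] using hc
        have hstep : (if (true : Bool) = true then pvAdd (acc, seen) t else (acc, seen))
            = (acc ++ [t], PySem.Set.add seen (pvTicker t)) := by
          simp [pvAdd, hnotin]
        rw [hstep, ih (acc ++ [t]) _ hseen' hnd.2]
        simp [PySem.Set.update]
      · have hc : PySem.Set.contains seen (pvTicker t) = true := hmt.trans hm
        have hin : pvTicker t ∈ seen := by simpa [pvContains_eq_decide] using hc
        have hstep : (if (true : Bool) = true then pvAdd (acc, seen) t else (acc, seen))
            = (acc, seen) := by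
          simp [pvAdd, hin]
        rw [hstep, ih acc seen (fun t' ht' => hseen t' (List.mem_cons_of_mem _ ht')) hnd.2]
        simp

lemma pvLoopB (p1 p2 p3 : List (String × String) → Bool) :
    ∀ (ts : List (List (String × String)))
      (a b c : List (List (String × String))),
      ts.foldl (fun bs t =>
          if p1 t then (bs.1 ++ [t], bs.2.1, bs.2.2)
          else if p2 t then (bs.1, bs.2.1 ++ [t], bs.2.2)
          else if p3 t then (bs.1, bs.2.1, bs.2.2 ++ [t])
          else bs) (a, b, c)
        = (a ++ ts.filter p1, b ++ ts.filter (fun t => !p1 t && p2 t),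
           c ++ ts.filter (fun t => !p1 t && !p2 t && p3 t)) := by
  intro ts
  induction ts with
  | nil => intro a b c; simp
  | cons t ts ih =>
    intro a b c
    simp only [List.foldl_cons, List.filter_cons]
    cases h1 : p1 t
    · cases h2 : p2 t
      · cases h3 : p3 t
        · simp [ih]
        · simp [ih]
      · simp [ih]
    · simp [ih]

-- ===== VERDICT (by name: the statement is the Claim_ definition above) =====
theorem search_tickers_spec : Claim_equal_search_tickers := by
  intro query limit _
  show search_tickers query limit = search_tickers_alt query limit
  unfold search_tickers search_tickers_alt
  cases hq : (query == "")
  · simp only [Bool.false_eq_true, if_false]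
    generalize PySem.Str.strip (PySem.Str.upper query) = q
    generalize PySem.Str.lower query = ql
    have hnd := pvNodup
    have hc0 : ∀ t ∈ pvPOPULAR,
        PySem.Set.contains PySem.Set.empty (pvTicker t) = (fun _ => false) t := by
      intro t _
      simp [PySem.Set.empty]
    rw [pvLoopA (fun t => pvTicker t == q) (fun _ => false) pvPOPULAR [] PySem.Set.empty hc0 hnd]
    simp only [List.nil_append, Bool.not_false, Bool.and_true]
    have hc1 : ∀ t ∈ pvPOPULAR,
        PySem.Set.contains
          (PySem.Set.update PySem.Set.empty
            (List.map pvTicker (List.filter (fun t => pvTicker t == q) pvPOPULAR)))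
          (pvTicker t)
          = (fun t => pvTicker t == q) t := by
      intro t ht
      rw [pvContains_eq_decide, Bool.eq_iff_iff]
      simp [PySem.Set.mem_update, PySem.Set.empty, pvMemMapFilter _ _ hnd t ht]
    rw [pvLoopA (fun t => PySem.Str.startswith (pvTicker t) q) (fun t => pvTicker t == q)
      pvPOPULAR _ _ hc1 hnd]
    have hc2 : ∀ t ∈ pvPOPULAR,
        PySem.Set.contains
          (PySem.Set.update
            (PySem.Set.update PySem.Set.empty
              (List.map pvTicker (List.filter (fun t => pvTicker t == q) pvPOPULAR)))
            (List.map pvTicker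
              (List.filter (fun t => PySem.Str.startswith (pvTicker t) q && !(pvTicker t == q))
                pvPOPULAR)))
          (pvTicker t)
          = (fun t => PySem.Str.startswith (pvTicker t) q) t := by
      intro t ht
      rw [pvContains_eq_decide, Bool.eq_iff_iff]
      simp only [decide_eq_true_eq, PySem.Set.mem_update, PySem.Set.empty, List.not_mem_nil,
        false_or, pvMemMapFilter _ _ hnd t ht]
      constructor
      · rintro (he | hs)
        · exact pvExactPrefix q t he
        · exact (Bool.and_eq_true_iff.mp hs).1
      · intro hs
        cases he : (pvTicker t == q)
        · exact Or.inr (by rw [hs]; decide)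
        · exact Or.inl rfl
    rw [pvLoopA (fun t => PySem.Str.isIn ql (PySem.Str.lower (pvName t)))
      (fun t => PySem.Str.startswith (pvTicker t) q) pvPOPULAR _ _ hc2 hnd]
    rw [pvLoopB (fun t => pvTicker t == q) (fun t => PySem.Str.startswith (pvTicker t) q)
      (fun t => PySem.Str.isIn ql (PySem.Str.lower (pvName t))) pvPOPULAR [] [] []]
    simp only [List.nil_append, List.append_assoc]
    have h2 : List.filter (fun t => PySem.Str.startswith (pvTicker t) q && !(pvTicker t == q))
          pvPOPULAR
        = List.filter (fun t => !(pvTicker t == q) && PySem.Str.startswith (pvTicker t) q)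
          pvPOPULAR := by
      apply List.filter_congr
      intro t _
      exact Bool.and_comm _ _
    have h3 : List.filter
          (fun t => PySem.Str.isIn ql (PySem.Str.lower (pvName t)) &&
            !PySem.Str.startswith (pvTicker t) q) pvPOPULAR
        = List.filter
          (fun t => !(pvTicker t == q) && !PySem.Str.startswith (pvTicker t) q &&
            PySem.Str.isIn ql (PySem.Str.lower (pvName t))) pvPOPULAR := by
      apply List.filter_congr
      intro t _
      cases hs : PySem.Str.startswith (pvTicker t) q
      · have he : (pvTicker t == q) = false := by
          cases he : (pvTicker t == q)
          · rfl
          · have hcontra := pvExactPrefix q t he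
            rw [hs] at hcontra
            exact absurd hcontra Bool.false_ne_true
        simp [he]
      · simp
    rw [h2, h3]
  · -- query = "": A returns POPULAR[:limit]; B's single pass puts every ticker
    -- (each starts with the empty prefix) into the prefix bucket, in order
    have hq' : query = "" := by simpa using hq
    subst hq'
    rw [if_pos rfl]
    exact congrArg (fun l => PySem.List.slice l none (some limit)) (by decide)
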